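-- pv_equiv track=rewrite | github.com/cyberfabric/cyber-pilot | src/cypilot_proxy/cache.py | _find_zip_prefix
-- ===== SOURCE A (Python) =====
-- def _find_zip_prefix(members: list) -> str:
--     """Find common top-level directory prefix in zip members."""
--     dirs = [m for m in members if "/" in m]
--     if not dirs:
--         return ""
--     first_parts = {m.split("/", 1)[0] for m in dirs}
--     if len(first_parts) == 1:
--         return first_parts.pop() + "/"
--     return ""
-- ===== SOURCE B (Python) =====
-- def _find_zip_prefix(members: list) -> str:
--     """Find common top-level directory prefix in zip members."""
--     dirs = [m for m in members if "/" in m]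
--     if not dirs:
--         return ""
--     # character-level longest common prefix of all dir names
--     common = dirs[0]
--     for m in dirs[1:]:
--         n = 0
--         while n < len(common) and n < len(m) and common[n] == m[n]:
--             n += 1
--         common = common[:n]
--     # cut at the first '/' of the common prefix (if any)
--     i = 0
--     while i < len(common) and common[i] != "/":
--         i += 1
--     if i == len(common):
--         return ""
--     return common[:i + 1]
-- ===== Notes on version B (the rewrite author's own statement) =====
-- stated objective: alternative
-- what changed: B replaces A's per-member split plus set-of-first-components by the character-level longest common prefix of all slash-containing names, then cuts that prefix at its first '/'.
import Mathlib
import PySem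

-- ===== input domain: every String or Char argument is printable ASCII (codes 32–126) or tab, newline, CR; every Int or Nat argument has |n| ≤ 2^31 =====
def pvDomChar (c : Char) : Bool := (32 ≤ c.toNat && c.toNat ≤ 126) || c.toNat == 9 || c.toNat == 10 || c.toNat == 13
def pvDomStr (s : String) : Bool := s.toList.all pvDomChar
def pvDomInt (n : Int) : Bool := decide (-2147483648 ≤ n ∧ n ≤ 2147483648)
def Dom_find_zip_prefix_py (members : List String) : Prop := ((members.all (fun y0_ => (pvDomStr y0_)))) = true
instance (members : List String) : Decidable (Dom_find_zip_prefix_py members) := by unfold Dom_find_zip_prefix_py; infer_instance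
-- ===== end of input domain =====

-- B replaces A's per-member split + set of first components by the character-level
-- longest common prefix of all slash-containing names, cut at its first '/'
-- (objective: alternative algorithm, similar cost).

-- '"/" in m' (the same membership test appears in both Pythons' filters)
def pvHasSlash (m : String) : Bool := PySem.Str.isIn "/" m

-- ===== PORT A =====
-- m.split("/", 1)[0]: splitMax? is some (sep ≠ "") and its result is nonempty, so [0] = headD ""
def pvFirstPart (m : String) : String := ((PySem.Str.splitMax? m "/" 1).getD []).headD ""

def find_zip_prefix_py (members : List String) : String :=
  let dirs := members.filter (fun m => pvHasSlash m)
  if dirs = [] then ""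
  else
    let first_parts : PySem.Set String := PySem.Set.ofList (dirs.map (fun m => pvFirstPart m))
    if PySem.Set.len first_parts = 1 then first_parts.headD "" ++ "/"  -- pop() on a 1-element set
    else ""

-- ===== PORT B =====
-- the inner while loop of Source B: n counts equal leading chars, common[:n] keeps them
def pvCp : List Char → List Char → List Char
  | a :: as, b :: bs => if a = b then a :: pvCp as bs else []
  | _, _ => []

def find_zip_prefix_py_alt (members : List String) : String :=
  let dirs := members.filter (fun m => pvHasSlash m)
  match dirs with
  | [] => ""
  | d :: rest =>
    -- fold the pairwise common prefix over dirs[1:]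
    let common := rest.foldl (fun c m => pvCp c m.toList) d.toList
    -- second while loop: i = index of first '/' in common (i = length if none)
    let pre := common.takeWhile (fun c => c ≠ '/')
    if pre.length = common.length then "" else String.ofList (pre ++ ['/'])

-- ===== PRECONDITION & SPEC =====
def Spec_find_zip_prefix_py (members : List String) (out : String) : Prop := out = find_zip_prefix_py_alt members
instance (members : List String) (out : String) : Decidable (Spec_find_zip_prefix_py members out) := by unfold Spec_find_zip_prefix_py; infer_instance

-- ===== CLAIM (what is proved, stated in full; the proofs are below) =====
def Claim_equal_find_zip_prefix_py : Prop := ∀ (members : List String), Dom_find_zip_prefix_py members → Spec_find_zip_prefix_py members (find_zip_prefix_py members)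

-- ===== LEMMAS AND PROOFS =====

-- first component of m at char level
def pvFirstL (m : String) : List Char := m.toList.takeWhile (fun c => c ≠ '/')

theorem pv_hasSlash_iff (m : String) : pvHasSlash m = true ↔ '/' ∈ m.toList := by
  rw [pvHasSlash, PySem.Str.isIn_iff_infix]
  constructor
  · rintro ⟨s, t, h⟩
    simp [← h]
  · intro h
    obtain ⟨s, t, he⟩ := List.append_of_mem h
    exact ⟨s, t, by simp [he]⟩
theorem pv_go_zero (fuel : ℕ) (l cur : List Char) (acc : List (List Char)) :
    PySem.Chars.splitOnMax.go ['/'] fuel 0 l cur acc = ((cur.reverse ++ l) :: acc).reverse := by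
  cases fuel <;> cases l <;> simp [PySem.Chars.splitOnMax.go]
theorem pv_go_one (l : List Char) : ∀ (fuel : ℕ) (cur : List Char) (acc : List (List Char)),
    l.length < fuel →
    PySem.Chars.splitOnMax.go ['/'] fuel 1 l cur acc =
      (if '/' ∈ l then ((l.dropWhile (fun c => c ≠ '/')).tail :: (cur.reverse ++ l.takeWhile (fun c => c ≠ '/')) :: acc)
       else ((cur.reverse ++ l) :: acc)).reverse := by
  induction l with
  | nil => intro fuel cur acc h
           match fuel, h with
           | fuel+1, _ => simp [PySem.Chars.splitOnMax.go]
  | cons c rest ih =>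
    intro fuel cur acc h
    match fuel, h with
    | fuel+1, h =>
      by_cases hc : c = '/'
      · subst hc
        rw [PySem.Chars.splitOnMax.go]
        simp [List.isPrefixOf, pv_go_zero, List.takeWhile, List.dropWhile]
      · rw [PySem.Chars.splitOnMax.go]
        have hpre : List.isPrefixOf ['/'] (c :: rest) = false := by
          simp [List.isPrefixOf]
          exact fun h' => hc h'.symm
        have hlt : rest.length < fuel := by simpa using h
        simp only [hpre, Bool.false_eq_true, if_false]
        rw [ih fuel (c :: cur) acc hlt]
        have hc' : ¬ '/' = c := fun h' => hc h'.symm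
        by_cases hm : '/' ∈ rest
        · simp [hm, hc', hc]
        · simp [hm, hc']


theorem pv_firstPart_eq (m : String) (h : '/' ∈ m.toList) :
    pvFirstPart m = String.ofList (pvFirstL m) := by
  rw [pvFirstPart, PySem.Str.splitMax?]
  have hsep : ("/" : String).toList = ['/'] := rfl
  rw [hsep]
  have h1 : PySem.Chars.splitMax? m.toList ['/'] 1 = some (PySem.Chars.splitOnMax m.toList ['/'] 1) := by
    simp [PySem.Chars.splitMax?]
  have h2 : PySem.Chars.splitOnMax m.toList ['/'] 1 =
      PySem.Chars.splitOnMax.go ['/'] (m.toList.length + 1) 1 m.toList [] [] := by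
    rw [PySem.Chars.splitOnMax]
    norm_num
  rw [h1, h2, pv_go_one m.toList (m.toList.length + 1) [] [] (by omega)]
  simp [h, pvFirstL]


theorem pvCp_prefix_left (a b : List Char) : pvCp a b <+: a := by
  induction a generalizing b with
  | nil => cases b <;> simp [pvCp]
  | cons x as ih =>
    cases b with
    | nil => simp [pvCp]
    | cons y bs =>
      by_cases hxy : x = y
      · simpa [pvCp, hxy] using ih bs
      · simp [pvCp, hxy]

theorem pvCp_prefix_right (a b : List Char) : pvCp a b <+: b := by
  induction a generalizing b with
  | nil => cases b <;> simp [pvCp]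
  | cons x as ih =>
    cases b with
    | nil => simp [pvCp]
    | cons y bs =>
      by_cases hxy : x = y
      · subst hxy; simpa [pvCp] using ih bs
      · simp [pvCp, hxy]

theorem pvCp_prefix_iff (p a b : List Char) : p <+: pvCp a b ↔ p <+: a ∧ p <+: b := by
  constructor
  · intro hp
    exact ⟨hp.trans (pvCp_prefix_left a b), hp.trans (pvCp_prefix_right a b)⟩
  · rintro ⟨ha, hb⟩
    induction p generalizing a b with
    | nil => simp
    | cons x p' ih =>
      obtain ⟨ta, rfl⟩ := ha
      obtain ⟨tb, hbb⟩ := hb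
      cases b with
      | nil => simp at hbb
      | cons y bs =>
        have hyx : y = x := by
          have := congrArg (List.head? ) hbb
          simpa using this.symm
        subst hyx
        have hbs : p' ++ tb = bs := by simpa using hbb
        have := ih (p' ++ ta) bs (by simp) ⟨tb, hbs⟩
        simp only [List.cons_append, pvCp, if_pos rfl]
        exact List.cons_prefix_cons.mpr ⟨rfl, this⟩

theorem pv_fold_prefix_iff (ds : List String) (a p : List Char) :
    p <+: ds.foldl (fun c m => pvCp c m.toList) a ↔ (p <+: a ∧ ∀ m ∈ ds, p <+: m.toList) := by
  induction ds generalizing a with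
  | nil => simp
  | cons d ds ih =>
    rw [List.foldl_cons, ih, pvCp_prefix_iff]
    constructor
    · rintro ⟨⟨h1, h2⟩, h3⟩
      refine ⟨h1, ?_⟩
      intro m hm
      rcases List.mem_cons.mp hm with hm | hm
      · simpa [hm] using h2
      · exact h3 m hm
    · rintro ⟨h1, h2⟩
      exact ⟨⟨h1, h2 d (by simp)⟩, fun m hm => h2 m (by simp [hm])⟩

theorem pv_takeWhile_append (P rest : List Char) (hP : ∀ c ∈ P, c ≠ '/') :
    (P ++ '/' :: rest).takeWhile (fun c => c ≠ '/') = P := by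
  induction P with
  | nil => simp
  | cons x xs ih =>
    have hx : x ≠ '/' := hP x (by simp)
    have ih' := ih (fun c hc => hP c (by simp [hc]))
    simp only [List.cons_append, List.takeWhile_cons]
    simp only [decide_not] at ih'
    simp [hx, ih']

theorem pv_decomp (l : List Char) (h : '/' ∈ l) :
    l = l.takeWhile (fun c => c ≠ '/') ++ '/' :: (l.dropWhile (fun c => c ≠ '/')).tail := by
  induction l with
  | nil => simp at h
  | cons x xs ih =>
    by_cases hx : x = '/'
    · subst hx; simp
    · have hm : '/' ∈ xs := by
        rcases List.mem_cons.mp h with h' | h'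
        · exact absurd h'.symm hx
        · exact h'
      simp only [List.takeWhile_cons, List.dropWhile_cons]
      simp only [decide_not]
      simp only [hx, decide_false, Bool.not_false, if_true]
      exact List.cons_inj_right x |>.mpr (ih hm) |> fun hh => by
        simpa using hh


theorem pvOfList_all_eq (f : String) (s fs : List String) (hf : f ∈ s)
    (h : fs.all (· == f) = true) : fs.foldl PySem.Set.add s = s := by
  induction fs with
  | nil => rfl
  | cons q rest ih =>
    simp only [List.all_cons, Bool.and_eq_true, beq_iff_eq] at h
    obtain ⟨hq, hrest⟩ := h
    have hadd : PySem.Set.add s q = s := by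
      rw [hq]
      simp [PySem.Set.add, PySem.Set.contains, hf]
    rw [List.foldl_cons, hadd]
    exact ih (by simpa using hrest)

theorem pvA_char (members : List String) :
    find_zip_prefix_py members =
      match members.filter (fun m => pvHasSlash m) with
      | [] => ""
      | d :: ds =>
        if (ds.map (fun m => pvFirstPart m)).all (· == pvFirstPart d)
        then pvFirstPart d ++ "/" else "" := by
  unfold find_zip_prefix_py
  cases hd : members.filter (fun m => pvHasSlash m) with
  | nil => simp
  | cons d ds =>
    simp only [hd]
    rw [if_neg (by simp)]
    by_cases hall : ((ds.map (fun m => pvFirstPart m)).all (· == pvFirstPart d)) = true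
    · have hset : PySem.Set.ofList (pvFirstPart d :: ds.map (fun m => pvFirstPart m)) = [pvFirstPart d] := by
        have := pvOfList_all_eq (pvFirstPart d) [pvFirstPart d] (ds.map (fun m => pvFirstPart m)) (by simp) hall
        simpa [PySem.Set.ofList_eq_foldl, PySem.Set.add, PySem.Set.empty] using this
      simp [hset, PySem.Set.len, hall]
    · have hlen : (PySem.Set.ofList (pvFirstPart d :: ds.map (fun m => pvFirstPart m))).length ≠ 1 := by
        intro h1
        obtain ⟨a, ha⟩ := List.length_eq_one_iff.mp h1
        have hfmem : pvFirstPart d ∈ PySem.Set.ofList (pvFirstPart d :: ds.map (fun m => pvFirstPart m)) := by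
          rw [PySem.Set.mem_ofList]; simp
        simp only [List.all_eq_true] at hall
        push Not at hall
        obtain ⟨q, hqmem, hq⟩ := hall
        have hqmem' : q ∈ PySem.Set.ofList (pvFirstPart d :: ds.map (fun m => pvFirstPart m)) := by
          rw [PySem.Set.mem_ofList]
          exact List.mem_cons.mpr (Or.inr hqmem)
        rw [ha] at hfmem hqmem'
        simp only [List.mem_singleton] at hfmem hqmem'
        apply hq
        simp [hqmem', hfmem]
      simp [PySem.Set.len, hlen, hall]


theorem pv_main (members : List String) :
    find_zip_prefix_py members = find_zip_prefix_py_alt members := by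
  rw [pvA_char]
  unfold find_zip_prefix_py_alt
  have hslash : ∀ m ∈ members.filter (fun m => pvHasSlash m), '/' ∈ m.toList := by
    intro m hm
    exact (pv_hasSlash_iff m).mp (List.of_mem_filter hm)
  cases hd : members.filter (fun m => pvHasSlash m) with
  | nil => simp
  | cons d ds =>
    rw [hd] at hslash
    have hdS : '/' ∈ d.toList := hslash d (by simp)
    have hdsS : ∀ m ∈ ds, '/' ∈ m.toList := fun m hm => hslash m (by simp [hm])
    simp only []
    set common := ds.foldl (fun c m => pvCp c m.toList) d.toList with hcommon
    have hc_d : common <+: d.toList := ((pv_fold_prefix_iff ds d.toList common).mp List.prefix_rfl).1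
    have hc_ds : ∀ m ∈ ds, common <+: m.toList := ((pv_fold_prefix_iff ds d.toList common).mp List.prefix_rfl).2
    by_cases hall : ((ds.map (fun m => pvFirstPart m)).all (· == pvFirstPart d)) = true
    · -- all first components equal
      have hfirst : ∀ m ∈ ds, pvFirstL m = pvFirstL d := by
        intro m hm
        have : pvFirstPart m = pvFirstPart d := by
          have := List.all_eq_true.mp hall (pvFirstPart m) (List.mem_map.mpr ⟨m, hm, rfl⟩)
          simpa using this
        rw [pv_firstPart_eq m (hdsS m hm), pv_firstPart_eq d hdS] at this
        exact String.ofList_inj.mp this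
      have hdecomp : ∀ (x : String), '/' ∈ x.toList → pvFirstL x ++ '/' :: (x.toList.dropWhile (fun c => c ≠ '/')).tail = x.toList := by
        intro x hx
        rw [pvFirstL]
        exact (pv_decomp x.toList hx).symm
      have hpref : pvFirstL d ++ ['/'] <+: common := by
        rw [hcommon, pv_fold_prefix_iff]
        constructor
        · refine ⟨(d.toList.dropWhile (fun c => c ≠ '/')).tail, ?_⟩
          simpa using hdecomp d hdS
        · intro m hm
          refine ⟨(m.toList.dropWhile (fun c => c ≠ '/')).tail, ?_⟩
          have h2 := hdecomp m (hdsS m hm)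
          rw [hfirst m hm] at h2
          simpa using h2
      obtain ⟨t, ht⟩ := hpref
      have hnoslash : ∀ c ∈ pvFirstL d, c ≠ '/' := by
        intro c hc
        simpa using List.mem_takeWhile_imp hc
      have hpre : common.takeWhile (fun c => c ≠ '/') = pvFirstL d := by
        rw [← ht]
        have := pv_takeWhile_append (pvFirstL d) t hnoslash
        simpa using this
      have hlen : (common.takeWhile (fun c => c ≠ '/')).length ≠ common.length := by
        rw [hpre, ← ht]
        simp
      rw [if_pos hall, if_neg hlen, hpre]
      rw [pv_firstPart_eq d hdS, ← String.ofList_append]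
    · -- some first component differs: common contains no '/'
      have hnos : '/' ∉ common := by
        intro hsl
        apply hall
        have hdec := pv_decomp common hsl
        have hpref : common.takeWhile (fun c => c ≠ '/') ++ ['/'] <+: common := by
          refine ⟨(common.dropWhile (fun c => c ≠ '/')).tail, ?_⟩
          simpa using hdec.symm
        have hnoslash : ∀ c ∈ common.takeWhile (fun c => c ≠ '/'), c ≠ '/' := by
          intro c hc
          simpa using List.mem_takeWhile_imp hc
        have hfst : ∀ (x : String), common.takeWhile (fun c => c ≠ '/') ++ ['/'] <+: x.toList → pvFirstL x = common.takeWhile (fun c => c ≠ '/') := by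
          intro x hx
          obtain ⟨t, ht⟩ := hx
          have ht' : x.toList = common.takeWhile (fun c => c ≠ '/') ++ '/' :: t := by
            rw [← ht]; simp
          rw [pvFirstL, ht']
          exact pv_takeWhile_append _ t hnoslash
        have hfd := hfst d (hpref.trans hc_d)
        rw [List.all_eq_true]
        intro q hq
        obtain ⟨m, hm, rfl⟩ := List.mem_map.mp hq
        have hfm := hfst m (hpref.trans (hc_ds m hm))
        rw [pv_firstPart_eq m (hdsS m hm), pv_firstPart_eq d hdS, hfm, hfd]
        simp
      have hlen : (common.takeWhile (fun c => c ≠ '/')).length = common.length := by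
        have : common.takeWhile (fun c => c ≠ '/') = common := by
          apply List.takeWhile_eq_self_iff.mpr
          intro x hx
          simp only [decide_eq_true_eq]
          exact fun h => hnos (h ▸ hx)
        rw [this]
      rw [if_neg hall, if_pos hlen]

-- ===== VERDICT (by name: the statement is the Claim_ definition above) =====
theorem find_zip_prefix_py_spec : Claim_equal_find_zip_prefix_py := by
  intro members _
  unfold Spec_find_zip_prefix_py
  exact pv_main members
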